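-- pv_equiv track=rewrite | github.com/BarbyDiaz/ejerciciosPython | 9.4_diccionarios.py | f
-- ===== SOURCE A (Python) =====
-- def encontrarPalabra(lista):
--     mayor=0
--     palabraMayor=" "
--
--
--     for x in lista:
--         if mayor<len(x):
--             mayor=len(x)
--             palabraMayor=x
--
--     return palabraMayor
--
-- def f(cadena):
--     dic={}
--     lista=cadena.split()
--     listaAux=[]
--
--
--     for y in cadena:
--         listaAux=[]
--         for x in lista:
--             if y in x:
--                 listaAux.append(x)
--         dic[y]=encontrarPalabra(listaAux)
--     return dic
-- ===== SOURCE B (Python) =====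
-- def f(cadena):
--     best = {}
--     for w in cadena.split():
--         for c in set(w):
--             if len(best.get(c, "")) < len(w):
--                 best[c] = w
--     return {y: best.get(y, " ") for y in cadena}
-- ===== Notes on version B (the rewrite author's own statement) =====
-- stated objective: faster
-- what changed: Instead of rescanning all words for every character of the input, B makes one pass over the words updating a per-character best-word dict (strictly-longer wins, so the earliest longest word is kept), then answers each character by a dict lookup defaulting to a single space.
import Mathlib
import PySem

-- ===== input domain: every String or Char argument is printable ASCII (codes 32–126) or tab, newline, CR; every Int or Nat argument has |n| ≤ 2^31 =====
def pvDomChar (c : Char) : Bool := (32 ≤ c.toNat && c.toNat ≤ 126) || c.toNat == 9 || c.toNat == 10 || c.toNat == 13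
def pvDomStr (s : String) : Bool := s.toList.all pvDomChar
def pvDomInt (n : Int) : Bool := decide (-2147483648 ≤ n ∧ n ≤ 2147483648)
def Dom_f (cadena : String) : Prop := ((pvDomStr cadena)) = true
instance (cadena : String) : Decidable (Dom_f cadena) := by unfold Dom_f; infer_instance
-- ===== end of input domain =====

-- B replaces A's per-character rescan of all words by one pass over the words that
-- maintains a per-character best-word dict (strictly-longer wins), then one lookup per character.

-- ===== PORT A =====
-- helper encontrarPalabra: running max over the list, strictly-greater updates, start (0, " ")
def encontrarPalabra (lista : List String) : String :=
  (lista.foldl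
    (fun (s : Int × String) x =>
      if s.1 < PySem.Str.len x then (PySem.Str.len x, x) else s)
    (0, " ")).2

def f (cadena : String) : List (String × String) :=
  let lista := PySem.Str.split₀ cadena
  let dic := cadena.toList.foldl
    (fun (d : PySem.Dict String String) y =>
      let listaAux := lista.foldl
        (fun acc x => if PySem.Str.isIn (String.ofList [y]) x then acc ++ [x] else acc) []
      d.insert (String.ofList [y]) (encontrarPalabra listaAux))
    PySem.Dict.empty
  dic.items

-- ===== PORT B =====
def f_alt (cadena : String) : List (String × String) :=
  let best := (PySem.Str.split₀ cadena).foldl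
    (fun (b : PySem.Dict Char String) w =>
      (PySem.Set.ofList w.toList).foldl
        (fun b c =>
          if PySem.Str.len (b.getD c "") < PySem.Str.len w then b.insert c w else b)
        b)
    PySem.Dict.empty
  let dic := cadena.toList.foldl
    (fun (d : PySem.Dict String String) y =>
      d.insert (String.ofList [y]) (best.getD y " "))
    PySem.Dict.empty
  dic.items

-- ===== PRECONDITION & SPEC =====
def Spec_f (cadena : String) (out : List (String × String)) : Prop := out = f_alt cadena
instance (cadena : String) (out : List (String × String)) : Decidable (Spec_f cadena out) := by unfold Spec_f; infer_instance

-- ===== CLAIM (what is proved, stated in full; the proofs are below) =====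
def Claim_equal_f : Prop := ∀ (cadena : String), Dom_f cadena → Spec_f cadena (f cadena)

-- ===== LEMMAS AND PROOFS =====

-- the option-level "best so far" fold that B's dict realises per key
def optBest (o : Option String) (L : List String) : Option String :=
  L.foldl (fun o w => if PySem.Str.len (o.getD "") < PySem.Str.len w then some w else o) o

-- effect of B's inner set-fold on one key's lookup
theorem get?_innerFold (w : String) (c : Char) :
    ∀ (cs : List Char) (b : PySem.Dict Char String), cs.Nodup →
    (cs.foldl
      (fun b c' =>
        if PySem.Str.len (b.getD c' "") < PySem.Str.len w then b.insert c' w else b) b).get? c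
    = if c ∈ cs then
        (if PySem.Str.len (b.getD c "") < PySem.Str.len w then some w else b.get? c)
      else b.get? c := by
  intro cs
  induction cs with
  | nil => intro b _; simp
  | cons c' cs ih =>
    intro b hnd
    rw [List.nodup_cons] at hnd
    simp only [List.foldl_cons, ih _ hnd.2, List.mem_cons]
    by_cases hc : c = c'
    · subst hc
      have hni : c ∉ cs := hnd.1
      simp only [hni, if_false, true_or, if_true]
      split_ifs <;>
        simp_all [PySem.Dict.get?_insert_self]
    · have hg : ∀ v, (b.insert c' w).getD c v = b.getD c v := fun v =>
        PySem.Dict.getD_insert_of_ne (hne := hc) ..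
      have hq : (b.insert c' w).get? c = b.get? c :=
        PySem.Dict.get?_insert_of_ne (hne := hc) ..
      by_cases hm : c ∈ cs <;>
        [skip; skip] <;>
        simp only [hm, hc, false_or, or_false, if_true, if_false] <;>
        split_ifs <;> simp_all <;> omega

-- invariant of B's outer fold: each key's lookup is the optBest fold over the words containing it
theorem get?_bestFold (c : Char) :
    ∀ (ws : List String) (b : PySem.Dict Char String),
    (ws.foldl
      (fun b w =>
        (PySem.Set.ofList w.toList).foldl
          (fun b c' =>
            if PySem.Str.len (b.getD c' "") < PySem.Str.len w then b.insert c' w else b) b)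
      b).get? c
    = optBest (b.get? c) (ws.filter (fun w => decide (c ∈ w.toList))) := by
  intro ws
  induction ws with
  | nil => intro b; simp [optBest]
  | cons w ws ih =>
    intro b
    simp only [List.foldl_cons, List.filter_cons, ih]
    rw [get?_innerFold w c (PySem.Set.ofList w.toList) b (PySem.Set.nodup_ofList _)]
    by_cases hm : c ∈ w.toList
    · rw [if_pos (show c ∈ PySem.Set.ofList w.toList by simp [PySem.Set.mem_ofList, hm])]
      simp only [hm, decide_true, if_true]
      simp only [optBest, List.foldl_cons]
      congr 1
    · rw [if_neg (show ¬ c ∈ PySem.Set.ofList w.toList by simp [PySem.Set.mem_ofList, hm])]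
      simp [hm]

-- A's helper fold equals the option fold, provided every element is a nonempty string
theorem encontrar_eq_optBest :
    ∀ (L : List String) (o : Option String), (∀ w ∈ L, 0 < PySem.Str.len w) →
    L.foldl
      (fun (s : Int × String) x =>
        if s.1 < PySem.Str.len x then (PySem.Str.len x, x) else s)
      (match o with | none => ((0 : Int), " ") | some v => (PySem.Str.len v, v))
    = (match optBest o L with | none => ((0 : Int), " ") | some v => (PySem.Str.len v, v)) := by
  intro L
  induction L with
  | nil => intro o _; simp [optBest]
  | cons x L ih =>
    intro o hpos
    have hx : 0 < PySem.Str.len x := hpos x (List.mem_cons_self ..)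
    have hrest : ∀ w ∈ L, 0 < PySem.Str.len w := fun w hw => hpos w (List.mem_cons_of_mem _ hw)
    cases o with
    | none =>
      have h0 : PySem.Str.len ((none : Option String).getD "") < PySem.Str.len x := by
        simp only [Option.getD_none, PySem.Str.len_eq, String.toList_empty, List.length_nil,
          Int.natCast_zero]
        exact hx
      simp only [List.foldl_cons, optBest]
      rw [if_pos h0, if_pos hx]
      exact ih (some x) hrest
    | some v =>
      simp only [List.foldl_cons, optBest, Option.getD_some]
      by_cases hlt : PySem.Str.len v < PySem.Str.len x
      · rw [if_pos hlt, if_pos hlt]; exact ih (some x) hrest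
      · rw [if_neg hlt, if_neg hlt]; exact ih (some v) hrest

-- the single-character substring test A uses is character membership
theorem isIn_singleton (y : Char) (x : String) :
    PySem.Str.isIn (String.ofList [y]) x = decide (y ∈ x.toList) := by
  have h := PySem.Str.isIn_iff_infix (String.ofList [y]) x
  by_cases hm : y ∈ x.toList
  · have ht : PySem.Str.isIn (String.ofList [y]) x = true :=
      h.mpr (by simpa using (List.singleton_infix_iff y x.toList).mpr hm)
    rw [ht]; simp [hm]
  · have hf : ¬ PySem.Str.isIn (String.ofList [y]) x = true := fun ht =>
      hm ((List.singleton_infix_iff y x.toList).mp (by simpa using h.mp ht))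
    simp only [Bool.not_eq_true] at hf
    rw [hf]; simp [hm]

-- a string whose character list contains y has positive length
theorem len_pos_of_mem {y : Char} {x : String} (h : y ∈ x.toList) : 0 < PySem.Str.len x := by
  rw [PySem.Str.len_eq]
  exact_mod_cast List.length_pos_of_mem h

-- per-character agreement of the two value computations
theorem value_eq (lista : List String) (best : PySem.Dict Char String)
    (hb : ∀ c, best.get? c = optBest none (lista.filter (fun w => decide (c ∈ w.toList))))
    (y : Char) :
    encontrarPalabra
      (lista.foldl
        (fun acc x => if PySem.Str.isIn (String.ofList [y]) x then acc ++ [x] else acc) [])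
    = best.getD y " " := by
  have hfold : (lista.foldl
      (fun acc x => if PySem.Str.isIn (String.ofList [y]) x then acc ++ [x] else acc) ([] : List String))
      = lista.filter (fun x => PySem.Str.isIn (String.ofList [y]) x) := by
    simpa using PySem.List.foldl_append_if_eq_filter
      (fun x => PySem.Str.isIn (String.ofList [y]) x) (l := lista) (acc := [])
  have hfilter : lista.filter (fun x => PySem.Str.isIn (String.ofList [y]) x)
      = lista.filter (fun w => decide (y ∈ w.toList)) := by
    apply List.filter_congr
    intro x _; exact isIn_singleton y x
  set L := lista.filter (fun w => decide (y ∈ w.toList)) with hL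
  have hpos : ∀ w ∈ L, 0 < PySem.Str.len w := by
    intro w hw
    rw [hL, List.mem_filter] at hw
    exact len_pos_of_mem (by simpa using hw.2)
  rw [PySem.Dict.getD_eq_get?_getD, hb y]
  unfold encontrarPalabra
  rw [hfold, hfilter]
  rw [encontrar_eq_optBest L none hpos]
  cases optBest none L <;> simp

-- ===== VERDICT (by name: the statement is the Claim_ definition above) =====
theorem f_spec : Claim_equal_f := by
  intro cadena _
  unfold Spec_f f f_alt
  simp only []
  apply congrArg PySem.Dict.items
  apply PySem.List.foldl_congr_mem
  intro d y _
  congr 1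
  exact value_eq (PySem.Str.split₀ cadena) _
    (fun c => get?_bestFold c (PySem.Str.split₀ cadena) PySem.Dict.empty) y
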